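-- pv_equiv track=rewrite | github.com/CA-git-com-co/ACGS | services/core/worker_agents/legal_agent.py | _generate_hipaa_recommendations
-- ===== SOURCE A (Python) =====
-- from typing import Any, Dict, List, Optional, Set
--
-- def _generate_hipaa_recommendations(violations: List[str]) -> List[str]:
--     """Generate HIPAA compliance recommendations"""
--     recommendations = []
--
--     if any('Privacy Rule' in v for v in violations):
--         recommendations.append('Implement HIPAA Privacy Rule safeguards and minimum necessary standards')
--
--     if any('Security Rule' in v for v in violations):
--         recommendations.append('Implement HIPAA Security Rule technical and administrative safeguards')
--
--     if any('breach notification' in v for v in violations):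
--         recommendations.append('Establish breach notification procedures and incident response')
--
--     return recommendations
-- ===== SOURCE B (Python) =====
-- _P = 'Implement HIPAA Privacy Rule safeguards and minimum necessary standards'
-- _S = 'Implement HIPAA Security Rule technical and administrative safeguards'
-- _B = 'Establish breach notification procedures and incident response'
--
-- # 8 possible outputs, indexed by p + 2*s + 4*b
-- _RESULTS = [
--     [],
--     [_P],
--     [_S],
--     [_P, _S],
--     [_B],
--     [_P, _B],
--     [_S, _B],
--     [_P, _S, _B],
-- ]
--
-- def _generate_hipaa_recommendations(violations):
--     """Generate HIPAA compliance recommendations (short-circuiting pass + result table)."""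
--     p = s = b = False
--     for v in violations:
--         p = p or 'Privacy Rule' in v
--         s = s or 'Security Rule' in v
--         b = b or 'breach notification' in v
--         if p and s and b:
--             break
--     return list(_RESULTS[(1 if p else 0) + (2 if s else 0) + (4 if b else 0)])
-- ===== Notes on version B (the rewrite author's own statement) =====
-- stated objective: alternative
-- what changed: Instead of three any()-scans each appending its recommendation, B makes one short-circuiting pass computing a 3-bit category index (breaking once all three categories are seen) and returns a copy of the corresponding entry of a precomputed 8-entry table of result lists.
import Mathlib
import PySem

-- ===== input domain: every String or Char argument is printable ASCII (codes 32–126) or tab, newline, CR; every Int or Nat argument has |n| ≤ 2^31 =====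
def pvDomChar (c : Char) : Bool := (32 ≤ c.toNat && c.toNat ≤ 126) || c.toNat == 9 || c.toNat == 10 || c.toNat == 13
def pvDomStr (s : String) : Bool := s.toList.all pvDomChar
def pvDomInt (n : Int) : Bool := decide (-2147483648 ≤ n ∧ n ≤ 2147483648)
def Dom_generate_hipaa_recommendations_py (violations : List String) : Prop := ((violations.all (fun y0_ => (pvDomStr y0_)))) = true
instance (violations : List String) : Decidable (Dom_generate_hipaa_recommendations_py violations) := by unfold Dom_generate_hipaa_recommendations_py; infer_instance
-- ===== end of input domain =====

-- B replaces A's three any()-scans + conditional appends by one short-circuiting pass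
-- computing a 3-bit category index and a lookup in a precomputed 8-entry table of outputs.

-- ===== PORT A =====
def generate_hipaa_recommendations_py (violations : List String) : List String :=
  let recommendations : List String := []
  let recommendations :=
    if violations.any (fun v => PySem.Str.isIn "Privacy Rule" v) then
      recommendations ++ ["Implement HIPAA Privacy Rule safeguards and minimum necessary standards"]
    else recommendations
  let recommendations :=
    if violations.any (fun v => PySem.Str.isIn "Security Rule" v) then
      recommendations ++ ["Implement HIPAA Security Rule technical and administrative safeguards"]
    else recommendations
  let recommendations :=
    if violations.any (fun v => PySem.Str.isIn "breach notification" v) then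
      recommendations ++ ["Establish breach notification procedures and incident response"]
    else recommendations
  recommendations

-- ===== PORT B =====
def pvP : String := "Implement HIPAA Privacy Rule safeguards and minimum necessary standards"
def pvS : String := "Implement HIPAA Security Rule technical and administrative safeguards"
def pvB : String := "Establish breach notification procedures and incident response"

-- the 8 possible outputs, indexed by p + 2*s + 4*b
def pvResults : List (List String) :=
  [[], [pvP], [pvS], [pvP, pvS], [pvB], [pvP, pvB], [pvS, pvB], [pvP, pvS, pvB]]

-- B's loop: accumulate the three category flags, breaking once all three are true
def pvScan : List String → Bool → Bool → Bool → Bool × Bool × Bool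
  | [], p, s, b => (p, s, b)
  | v :: vs, p, s, b =>
    let p := p || PySem.Str.isIn "Privacy Rule" v
    let s := s || PySem.Str.isIn "Security Rule" v
    let b := b || PySem.Str.isIn "breach notification" v
    if p && s && b then (p, s, b) else pvScan vs p s b

def generate_hipaa_recommendations_py_alt (violations : List String) : List String :=
  let (p, s, b) := pvScan violations false false false
  pvResults.getD ((if p then 1 else 0) + (if s then 2 else 0) + (if b then 4 else 0)) []

-- ===== PRECONDITION & SPEC =====
def Spec_generate_hipaa_recommendations_py (violations : List String) (out : List String) : Prop := out = generate_hipaa_recommendations_py_alt violations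
instance (violations : List String) (out : List String) : Decidable (Spec_generate_hipaa_recommendations_py violations out) := by unfold Spec_generate_hipaa_recommendations_py; infer_instance

-- ===== CLAIM (what is proved, stated in full; the proofs are below) =====
def Claim_equal_generate_hipaa_recommendations_py : Prop := ∀ (violations : List String), Dom_generate_hipaa_recommendations_py violations → Spec_generate_hipaa_recommendations_py violations (generate_hipaa_recommendations_py violations)

-- ===== LEMMAS AND PROOFS =====

-- the short-circuiting scan computes exactly the three 'any' flags
theorem pv_scan_eq : ∀ (vs : List String) (p s b : Bool),
    pvScan vs p s b =
      (p || vs.any (fun v => PySem.Str.isIn "Privacy Rule" v),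
       s || vs.any (fun v => PySem.Str.isIn "Security Rule" v),
       b || vs.any (fun v => PySem.Str.isIn "breach notification" v)) := by
  intro vs
  induction vs with
  | nil => intro p s b; simp [pvScan]
  | cons v vs ih =>
    intro p s b
    simp only [pvScan, List.any_cons]
    split
    · rename_i h
      simp only [Bool.and_eq_true] at h
      obtain ⟨⟨hp, hs⟩, hb⟩ := h
      simp only [← Bool.or_assoc, hp, hs, hb, Bool.true_or]
    · rw [ih]
      simp [Bool.or_assoc]

-- ===== VERDICT (by name: the statement is the Claim_ definition above) =====
theorem generate_hipaa_recommendations_py_spec : Claim_equal_generate_hipaa_recommendations_py := by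
  intro violations _
  unfold Spec_generate_hipaa_recommendations_py
  unfold generate_hipaa_recommendations_py generate_hipaa_recommendations_py_alt
  rw [pv_scan_eq]
  by_cases c1 : (violations.any fun v => PySem.Str.isIn "Privacy Rule" v) = true <;>
  by_cases c2 : (violations.any fun v => PySem.Str.isIn "Security Rule" v) = true <;>
  by_cases c3 : (violations.any fun v => PySem.Str.isIn "breach notification" v) = true <;>
  simp only [Bool.not_eq_true] at c1 c2 c3 <;>
  simp only [c1, c2, c3, if_true, if_false, Bool.false_eq_true] <;> rfl
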